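-- pv_equiv track=rewrite | github.com/EdlinOrg/colaboratory_helpers | colaboratory_helpers/uicheckboxmulticlass.py | anyTextToColor
-- ===== SOURCE A (Python) =====
-- def anyTextToColor(mystr, r=None):
--     """
--     Converts s string to a hex color
--     :param mystr: any string
--     :param r: hard code the red value to this
--     :return: for example "a0c73a"
--     """
--
--     if len(mystr) < 3:
--         # pad up with zeros
--         while len(mystr) % 3 != 0:
--             mystr += "0"
--
--     i = 0
--     sum1 = 0
--     sum2 = 0
--     sum3 = 0
--     for c in mystr:
--         if i % 3 == 0:
--             sum1 += int( str(ord(c)) + str(i)[::-1])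
--         if i % 3 == 1:
--             sum2 += int(str(ord(c)) + str(i)[::-1])
--         if i % 3 == 2:
--             sum3 += int(str(ord(c)) + str(i)[::-1])
--         i += 1
--
--     x1 = sum1 % 255
--     x2 = sum2 % 255
--     x3 = sum3 % 255
--
--     if r is not None:
--         x1 = r
--
--     # if we wants to force a shade of green
--     # x2 = 255
--
--     outstr = "%x%x%x" % (x1, x2, x3)
--
--     while len(outstr) < 6:
--         outstr += "a"
--
--     return outstr
-- ===== SOURCE B (Python) =====
-- def anyTextToColor(mystr, r=None):
--     """
--     Converts s string to a hex color (strided-slice re-implementation).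
--     """
--     if 0 < len(mystr) < 3:
--         mystr = mystr.ljust(3, "0")
--
--     def stripe(o):
--         return sum(int(str(ord(c)) + str(3 * k + o)[::-1])
--                    for k, c in enumerate(mystr[o::3])) % 255
--
--     x1 = stripe(0) if r is None else r
--     return ("%x%x%x" % (x1, stripe(1), stripe(2))).ljust(6, "a")
-- ===== Notes on version B (the rewrite author's own statement) =====
-- stated objective: alternative
-- what changed: B replaces A's single counter loop with i%3 branches and its two while-append padding loops by three independent strided-slice passes (mystr[o::3] with the global index reconstructed as 3*k+o) and ljust-style padding; timing was borderline (1.5-2.2x at the largest size), so no speed is claimed.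
import Mathlib
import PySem

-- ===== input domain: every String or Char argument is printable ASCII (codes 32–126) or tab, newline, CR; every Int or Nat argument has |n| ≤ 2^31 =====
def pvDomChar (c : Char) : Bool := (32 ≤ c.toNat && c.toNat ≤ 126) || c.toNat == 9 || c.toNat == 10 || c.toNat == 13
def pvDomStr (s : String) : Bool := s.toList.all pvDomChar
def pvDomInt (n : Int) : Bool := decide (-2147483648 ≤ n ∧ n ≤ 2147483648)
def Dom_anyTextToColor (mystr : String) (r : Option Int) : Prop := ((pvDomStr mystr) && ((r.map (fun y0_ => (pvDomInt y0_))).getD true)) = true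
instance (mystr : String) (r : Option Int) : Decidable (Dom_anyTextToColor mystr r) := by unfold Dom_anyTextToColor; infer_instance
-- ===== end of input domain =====

-- B re-implements the hash by three strided slice passes (index 3*k+o reconstructed) and ljust-style
-- padding instead of A's single counter loop with i%3 branches and while-append padding; same cost
-- ("alternative" objective, no speed claim).

-- ===== PORT A =====
-- shared subexpression of both Pythons: int(str(ord(c)) + str(i)[::-1]).
-- The argument of int() is always a non-empty digit string here, so int() never raises and the
-- `.getD 0` default is never taken.
def pyTerm (c : Char) (i : Int) : Int :=
  (PySem.Int.ofChars? (PySem.Int.toChars (c.toNat : Int) ++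
      ((PySem.List.slice? (PySem.Int.toChars i) none none (-1)).getD []))).getD 0

-- hand port of C-style '%x' % n (no PySem primitive): lowercase hex digits, '-' prefix for n < 0;
-- exact for every Python int.
def pyHexChars (n : Int) : List Char :=
  if n < 0 then '-' :: Nat.toDigits 16 n.natAbs else Nat.toDigits 16 n.toNat

-- A: while len(mystr) % 3 != 0: mystr += "0"
def padZeros (cs : List Char) : List Char :=
  if cs.length % 3 ≠ 0 then padZeros (cs ++ ['0']) else cs
termination_by (3 - cs.length % 3) % 3
decreasing_by simp; omega

-- A: while len(outstr) < 6: outstr += "a"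
def padSixA (cs : List Char) : List Char :=
  if cs.length < 6 then padSixA (cs ++ ['a']) else cs
termination_by 6 - cs.length
decreasing_by simp; omega

def anyTextToColor (mystr : String) (r : Option Int) : String :=
  let cs0 := mystr.toList
  let cs := if cs0.length < 3 then padZeros cs0 else cs0
  let st := cs.foldl (fun (st : Int × Int × Int × Int) c =>
      let i := st.1
      let s1 := if PySem.Int.mod i 3 == 0 then st.2.1 + pyTerm c i else st.2.1
      let s2 := if PySem.Int.mod i 3 == 1 then st.2.2.1 + pyTerm c i else st.2.2.1
      let s3 := if PySem.Int.mod i 3 == 2 then st.2.2.2 + pyTerm c i else st.2.2.2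
      (i + 1, s1, s2, s3)) (0, 0, 0, 0)
  let x1 := PySem.Int.mod st.2.1 255
  let x2 := PySem.Int.mod st.2.2.1 255
  let x3 := PySem.Int.mod st.2.2.2 255
  let x1 := match r with | some rv => rv | none => x1
  String.ofList (padSixA (pyHexChars x1 ++ pyHexChars x2 ++ pyHexChars x3))

-- ===== PORT B =====
-- B: sum(int(str(ord(c)) + str(3*k+o)[::-1]) for k, c in enumerate(mystr[o::3])) % 255
def stripe (cs : List Char) (o : Int) : Int :=
  PySem.Int.mod
    (((PySem.List.enumerate ((PySem.List.slice? cs (some o) none 3).getD []) 0).map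
        (fun kc => pyTerm kc.2 (3 * kc.1 + o))).sum) 255

def anyTextToColor_alt (mystr : String) (r : Option Int) : String :=
  let cs0 := mystr.toList
  let cs := if 0 < cs0.length ∧ cs0.length < 3
            then cs0 ++ List.replicate (3 - cs0.length) '0' else cs0   -- ljust(3, "0")
  let x1 := match r with | none => stripe cs 0 | some rv => rv
  let out := pyHexChars x1 ++ pyHexChars (stripe cs 1) ++ pyHexChars (stripe cs 2)
  String.ofList (out ++ List.replicate (6 - out.length) 'a')           -- ljust(6, "a")

-- ===== PRECONDITION & SPEC =====
def Spec_anyTextToColor (mystr : String) (r : Option Int) (out : String) : Prop := out = anyTextToColor_alt mystr r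
instance (mystr : String) (r : Option Int) (out : String) : Decidable (Spec_anyTextToColor mystr r out) := by unfold Spec_anyTextToColor; infer_instance

-- ===== CLAIM (what is proved, stated in full; the proofs are below) =====
def Claim_equal_anyTextToColor : Prop := ∀ (mystr : String) (r : Option Int), Dom_anyTextToColor mystr r → Spec_anyTextToColor mystr r (anyTextToColor mystr r)

-- ===== LEMMAS AND PROOFS =====

def sumO (cs : List Char) (o : Nat) : Int :=
  ((List.range ((cs.length - o + 2) / 3)).map
    (fun k => pyTerm (cs.getD (o + 3 * k) '0') (3 * (k : Int) + (o : Int)))).sum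

theorem sumO_append (cs : List Char) (c : Char) (o : Nat) (ho : o < 3) :
    sumO (cs ++ [c]) o
      = sumO cs o + (if cs.length % 3 = o then pyTerm c (cs.length : Int) else 0) := by
  unfold sumO
  by_cases h : cs.length % 3 = o
  · have hm : ∃ m, cs.length = 3 * m + o := ⟨cs.length / 3, by omega⟩
    obtain ⟨m, hm⟩ := hm
    have hc1 : (cs.length - o + 2) / 3 = m := by omega
    have hc2 : ((cs ++ [c]).length - o + 2) / 3 = m + 1 := by simp; omega
    rw [hc2, hc1, List.range_succ, List.map_append, List.sum_append]
    simp only [if_pos h]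
    congr 1
    · congr 1
      apply List.map_congr_left
      intro k hk
      simp only [List.mem_range] at hk
      rw [List.getD_append _ _ _ _ (by omega)]
    · have h1 : (cs ++ [c])[o + 3 * m]? = some c := by
        rw [show o + 3 * m = cs.length by omega]
        exact List.getElem?_concat_length
      have h2 : (3 * (m : Int) + (o : Int)) = (cs.length : Int) := by omega
      simp [h1, h2]
  · have hc : ((cs ++ [c]).length - o + 2) / 3 = (cs.length - o + 2) / 3 := by simp; omega
    rw [hc, if_neg h, add_zero]
    congr 1
    apply List.map_congr_left
    intro k hk
    simp only [List.mem_range] at hk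
    rw [List.getD_append _ _ _ _ (by omega)]

theorem foldA_eq (cs : List Char) :
    cs.foldl (fun (st : Int × Int × Int × Int) c =>
      let i := st.1
      let s1 := if PySem.Int.mod i 3 == 0 then st.2.1 + pyTerm c i else st.2.1
      let s2 := if PySem.Int.mod i 3 == 1 then st.2.2.1 + pyTerm c i else st.2.2.1
      let s3 := if PySem.Int.mod i 3 == 2 then st.2.2.2 + pyTerm c i else st.2.2.2
      (i + 1, s1, s2, s3)) (0, 0, 0, 0)
      = ((cs.length : Int), sumO cs 0, sumO cs 1, sumO cs 2) := by
  induction cs using List.reverseRecOn with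
  | nil => simp [sumO]
  | append_singleton cs c ih =>
    rw [List.foldl_append, ih]
    simp only [List.foldl_cons, List.foldl_nil]
    have hmod : PySem.Int.mod (cs.length : Int) 3 = ((cs.length % 3 : Nat) : Int) := by
      exact_mod_cast PySem.Int.mod_natCast cs.length 3
    rw [sumO_append cs c 0 (by omega), sumO_append cs c 1 (by omega),
        sumO_append cs c 2 (by omega)]
    simp only [hmod]
    have h3 : cs.length % 3 = 0 ∨ cs.length % 3 = 1 ∨ cs.length % 3 = 2 := by omega
    rcases h3 with h | h | h <;> rw [h] <;> simp

theorem slice3_eq (cs : List Char) (o : Nat) (ho : o < 3) :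
    (PySem.List.slice? cs (some (o : Int)) none 3).getD []
      = (List.range ((cs.length - o + 2) / 3)).map (fun k => cs.getD (o + 3 * k) '0') := by
  simp only [PySem.List.slice?, PySem.List.sliceIndices]
  norm_num
  have ho0 : ¬((o : Int) < 0) := by omega
  simp only [if_neg ho0]
  by_cases hlt : o < cs.length
  · have hmin : min (o : Int) (cs.length : Int) = (o : Int) := by
      apply min_eq_left; exact_mod_cast hlt.le
    rw [hmin]
    rw [if_pos (by exact_mod_cast hlt)]
    have hcnt : ((((cs.length : Int) - o + 3 - 1) / 3).toNat) = (cs.length - o + 2) / 3 := by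
      omega
    rw [hcnt]
    rw [List.filterMap_congr (g := fun k => some (cs[o + 3 * k]?.getD '0')) ?_]
    · simp
    · intro k hk
      simp only [List.mem_range] at hk
      have hidx : (((o : Int) + 3 * (k : Int)).toNat) = o + 3 * k := by omega
      have hin : o + 3 * k < cs.length := by omega
      rw [hidx, List.getElem?_eq_getElem hin]
      simp [List.getElem?_eq_getElem hin]
  · have hmin : min (o : Int) (cs.length : Int) = (cs.length : Int) := by
      apply min_eq_right; exact_mod_cast Nat.le_of_not_lt hlt
    rw [hmin]
    rw [if_neg (by omega)]
    have : (cs.length - o + 2) / 3 = 0 := by omega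
    rw [this]
    simp

theorem enumerate_map_range {α : Type} (f : Nat → α) (n : Nat) (s : Int) :
    PySem.List.enumerate ((List.range n).map f) s
      = (List.range n).map (fun (k : Nat) => (s + (k : Int), f k)) := by
  induction n with
  | zero => simp
  | succ n ih =>
    rw [List.range_succ, List.map_append, List.map_append, PySem.List.enumerate_append, ih]
    simp [PySem.List.enumerate_cons, PySem.List.enumerate_nil]

theorem stripe_eq (cs : List Char) (o : Nat) (ho : o < 3) :
    stripe cs (o : Int) = PySem.Int.mod (sumO cs o) 255 := by
  unfold stripe sumO
  rw [slice3_eq cs o ho, enumerate_map_range, List.map_map]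
  congr 1
  congr 1
  apply List.map_congr_left
  intro k _
  simp

theorem pad_eq (cs : List Char) :
    (if cs.length < 3 then padZeros cs else cs)
      = (if 0 < cs.length ∧ cs.length < 3 then cs ++ List.replicate (3 - cs.length) '0' else cs) := by
  match cs with
  | [] => rw [padZeros]; simp
  | [a] =>
    rw [padZeros]; rw [padZeros]; rw [padZeros]
    simp
  | [a, b] =>
    rw [padZeros]; rw [padZeros]
    simp
  | a :: b :: c :: t => simp

theorem padSixA_eq (out : List Char) :
    padSixA out = out ++ List.replicate (6 - out.length) 'a' := by
  generalize h : 6 - out.length = n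
  induction n generalizing out with
  | zero => rw [padSixA]; simp; omega
  | succ n ih =>
    rw [padSixA]
    have hl : out.length < 6 := by omega
    simp only [if_pos hl]
    rw [ih (out ++ ['a']) (by simp; omega)]
    simp [List.replicate_succ]

-- ===== VERDICT (by name: the statement is the Claim_ definition above) =====
theorem anyTextToColor_spec : Claim_equal_anyTextToColor := by
  intro mystr r _
  unfold Spec_anyTextToColor
  unfold anyTextToColor anyTextToColor_alt
  simp only []
  rw [← pad_eq mystr.toList]
  set cs := if mystr.toList.length < 3 then padZeros mystr.toList else mystr.toList with hcs
  rw [foldA_eq cs]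
  have s0 : stripe cs 0 = PySem.Int.mod (sumO cs 0) 255 := by
    have := stripe_eq cs 0 (by omega); simpa using this
  have s1 : stripe cs 1 = PySem.Int.mod (sumO cs 1) 255 := by
    have := stripe_eq cs 1 (by omega); simpa using this
  have s2 : stripe cs 2 = PySem.Int.mod (sumO cs 2) 255 := by
    have := stripe_eq cs 2 (by omega); simpa using this
  rw [padSixA_eq]
  cases r <;> simp [s0, s1, s2]
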